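-- pv_equiv track=rewrite | github.com/SalmanAlexey/Ivi | api.py | last_comment
-- ===== SOURCE A (Python) =====
-- def last_comment(comments_db):
--     # Оставляем последний комментарий от каждой задачи
--     last_comments_db = []
--     size = len(comments_db)
--     for idx, comment in enumerate(comments_db):
--         if idx == size - 1:
--             last_comments_db.append(comment)
--         elif comment[0] != comments_db[idx + 1][0]:
--             last_comments_db.append(comment)
--     return last_comments_db
-- ===== SOURCE B (Python) =====
-- def last_comment(comments_db):
--     # group the comments into maximal consecutive runs sharing the task id
--     # (first field), then keep the last comment of each run
--     runs = []
--     for comment in comments_db: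
--         if runs and runs[-1][-1][0] == comment[0]:
--             runs[-1].append(comment)
--         else:
--             runs.append([comment])
--     return [run[-1] for run in runs]
-- ===== Notes on version B (the rewrite author's own statement) =====
-- stated objective: alternative
-- what changed: A scans with an index, comparing each comment's id with the id at idx+1 and special-casing the last index; B first partitions the list into maximal consecutive runs of equal id (one accumulator pass) and then takes the last element of each run.
import Mathlib
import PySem

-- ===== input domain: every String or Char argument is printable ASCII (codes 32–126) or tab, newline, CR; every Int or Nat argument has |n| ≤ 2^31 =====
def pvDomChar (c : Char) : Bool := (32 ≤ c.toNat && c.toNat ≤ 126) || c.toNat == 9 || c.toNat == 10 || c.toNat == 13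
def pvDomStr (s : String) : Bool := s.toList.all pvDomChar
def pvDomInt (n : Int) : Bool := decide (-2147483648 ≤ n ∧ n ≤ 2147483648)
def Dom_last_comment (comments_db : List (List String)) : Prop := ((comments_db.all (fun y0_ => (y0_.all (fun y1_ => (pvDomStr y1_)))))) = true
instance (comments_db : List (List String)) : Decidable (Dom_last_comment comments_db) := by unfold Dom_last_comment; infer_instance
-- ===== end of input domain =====

-- B groups the list into maximal consecutive runs of equal first field and keeps each
-- run's last comment, replacing A's index look-ahead and last-index special case.

-- ===== PORT A =====
-- the for-loop over enumerate(comments_db), carrying idx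
def lcA_go (comments_db : List (List String)) (size : Int) : Int → List (List String) → List (List String)
  | _, [] => []
  | idx, comment :: rest =>
    (if idx = size - 1 then [comment]
     else if PySem.List.pyGet? comment 0 ≠ ((PySem.List.pyGet? comments_db (idx + 1)).bind (fun nxt => PySem.List.pyGet? nxt 0)) then [comment]
     else []) ++ lcA_go comments_db size (idx + 1) rest

def last_comment (comments_db : List (List String)) : List (List String) :=
  lcA_go comments_db (comments_db.length : Int) 0 comments_db

-- ===== PORT B =====
-- one iteration of B's run-building loop: extend the last run or start a new one
def bStep (runs : List (List (List String))) (comment : List String) : List (List (List String)) :=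
  if runs ≠ [] ∧ ((PySem.List.pyGet? runs (-1)).bind (fun run => PySem.List.pyGet? run (-1))).bind (fun lastc => PySem.List.pyGet? lastc 0) = PySem.List.pyGet? comment 0
  then runs.dropLast ++ [(runs.getLast?.getD []) ++ [comment]]
  else runs ++ [[comment]]

def last_comment_alt (comments_db : List (List String)) : List (List String) :=
  (comments_db.foldl bStep []).map (fun run => (PySem.List.pyGet? run (-1)).getD [])

-- ===== PRECONDITION & SPEC =====
-- Pre_ excludes inputs of length ≥ 2 containing an empty inner list: there the Python A
-- raises IndexError on comment[0] (and Python B raises the same way).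
def Pre_last_comment (comments_db : List (List String)) : Prop :=
  comments_db.length ≤ 1 ∨ ∀ c ∈ comments_db, c ≠ []
instance (comments_db : List (List String)) : Decidable (Pre_last_comment comments_db) := by unfold Pre_last_comment; infer_instance
def pvWitness_last_comment : List (List String) := [["1", "a"], ["1", "b"], ["2", "c"]]

def Spec_last_comment (comments_db : List (List String)) (out : List (List String)) : Prop := out = last_comment_alt comments_db
instance (comments_db : List (List String)) (out : List (List String)) : Decidable (Spec_last_comment comments_db out) := by unfold Spec_last_comment; infer_instance

-- ===== CLAIM (what is proved, stated in full; the proofs are below) =====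
def Claim_equal_last_comment : Prop := ∀ (comments_db : List (List String)), Dom_last_comment comments_db → Pre_last_comment comments_db → Spec_last_comment comments_db (last_comment comments_db)

-- ===== LEMMAS AND PROOFS =====

-- reference recursion: keep a comment iff its id differs from the next one's
def lcRec : List (List String) → List (List String)
  | [] => []
  | [x] => [x]
  | x :: y :: r =>
    if PySem.List.pyGet? x 0 ≠ PySem.List.pyGet? y 0 then x :: lcRec (y :: r) else lcRec (y :: r)

theorem lcA_go_eq (db : List (List String)) :
    ∀ (rest : List (List String)) (n : Nat), db.drop n = rest →
      lcA_go db (db.length : Int) (n : Int) rest = lcRec rest := by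
  intro rest
  induction rest with
  | nil => intro n _; simp [lcA_go, lcRec]
  | cons c tail ih =>
    intro n hdrop
    cases tail with
    | nil =>
      have hlen : db.length - n = 1 ∧ n < db.length := by
        have h := congrArg List.length hdrop
        rw [List.length_drop] at h
        simp at h; omega
      have hlast : (n : Int) = (db.length : Int) - 1 := by omega
      simp [lcA_go, lcRec, hlast]
    | cons d r =>
      have hlen : db.length - n = r.length + 2 ∧ n < db.length := by
        have h := congrArg List.length hdrop
        rw [List.length_drop] at h
        simp at h; omega
      have hnot : ¬ ((n : Int) = (db.length : Int) - 1) := by omega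
      have hnext : db[n + 1]? = some d := by
        have h : (db.drop n)[1]? = some d := by rw [hdrop]; rfl
        simpa [List.getElem?_drop] using h
      have harg : (n : Int) + 1 = ((n + 1 : Nat) : Int) := by push_cast; ring
      have hget : PySem.List.pyGet? db ((n : Int) + 1) = some d := by
        rw [harg, PySem.List.pyGet?_natCast, hnext]
      have key : ((PySem.List.pyGet? db ((n : Int) + 1)).bind fun nxt => PySem.List.pyGet? nxt 0)
          = PySem.List.pyGet? d 0 := by rw [hget]; rfl
      have hdrop' : db.drop (n + 1) = d :: r := by
        have h := congrArg List.tail hdrop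
        simpa [List.tail_drop] using h
      have ihr := ih (n + 1) hdrop'
      have step : lcA_go db (db.length : Int) (n : Int) (c :: d :: r)
          = (if (n : Int) = (db.length : Int) - 1 then [c]
             else if PySem.List.pyGet? c 0 ≠ ((PySem.List.pyGet? db ((n : Int) + 1)).bind fun nxt => PySem.List.pyGet? nxt 0) then [c]
             else []) ++ lcA_go db (db.length : Int) ((n : Int) + 1) (d :: r) := rfl
      rw [step, if_neg hnot, key, harg, ihr]
      by_cases hk : PySem.List.pyGet? c 0 = PySem.List.pyGet? d 0
      · simp [lcRec, hk]
      · simp [lcRec, hk]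

theorem last_comment_eq_lcRec (db : List (List String)) : last_comment db = lcRec db := by
  simpa using lcA_go_eq db db 0 rfl

theorem bStep_shift (rs : List (List (List String))) (r : List (List String)) (_hr : r ≠ [])
    (c : List String) :
    bStep (rs ++ [r]) c = rs ++ bStep [r] c
      ∧ (∃ rs' r', r' ≠ [] ∧ bStep [r] c = rs' ++ [r']) := by
  have h1 : PySem.List.pyGet? (rs ++ [r]) (-1) = some r :=
    PySem.List.pyGet?_neg_one_append_singleton rs r
  have h2 : PySem.List.pyGet? ([r] : List (List (List String))) (-1) = some r := by
    simpa using PySem.List.pyGet?_neg_one_append_singleton ([] : List (List (List String))) r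
  unfold bStep
  rw [h1, h2]
  simp only [Option.bind_some]
  split_ifs with hc hc' hc'
  · exact ⟨by simp, [], r ++ [c], by simp, by simp⟩
  · exact absurd ⟨by simp, hc.2⟩ hc'
  · exact absurd ⟨by simp, hc'.2⟩ hc
  · exact ⟨by simp, [r], [c], by simp, by simp⟩

theorem foldl_bStep_shift (db : List (List String)) :
    ∀ (rs : List (List (List String))) (r : List (List String)), r ≠ [] →
      List.foldl bStep (rs ++ [r]) db = rs ++ List.foldl bStep [r] db := by
  induction db with
  | nil => intro rs r _; simp
  | cons c db' ih =>
    intro rs r hr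
    obtain ⟨hstep, rs', r', hr', hform⟩ := bStep_shift rs r hr c
    simp only [List.foldl_cons, hstep, hform]
    rw [← List.append_assoc, ih (rs ++ rs') r' hr', ih rs' r' hr', List.append_assoc]

theorem foldl_bStep_run (db : List (List String)) :
    ∀ (r : List (List String)) (c : List String),
      (List.foldl bStep [r ++ [c]] db).map (fun run => (PySem.List.pyGet? run (-1)).getD [])
        = lcRec (c :: db) := by
  induction db with
  | nil =>
    intro r c
    simp [lcRec, PySem.List.pyGet?_neg_one_append_singleton r c]
  | cons d db' ih =>
    intro r c
    have h1 : PySem.List.pyGet? ([r ++ [c]] : List (List (List String))) (-1) = some (r ++ [c]) := by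
      simpa using PySem.List.pyGet?_neg_one_append_singleton ([] : List (List (List String))) (r ++ [c])
    have h2 : PySem.List.pyGet? (r ++ [c]) (-1) = some c :=
      PySem.List.pyGet?_neg_one_append_singleton r c
    simp only [List.foldl_cons, bStep, h1, h2, Option.bind_some]
    by_cases hk : PySem.List.pyGet? c 0 = PySem.List.pyGet? d 0
    · rw [if_pos ⟨by simp, hk⟩]
      simp only [List.dropLast_singleton, List.getLast?_singleton, Option.getD_some,
        List.nil_append, List.append_assoc]
      have h := ih (r ++ [c]) d
      simp only [List.append_assoc] at h
      rw [h]
      simp [lcRec, hk]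
    · rw [if_neg (by intro h; exact hk h.2)]
      have hshift := foldl_bStep_shift db' [r ++ [c]] [d] (by simp)
      rw [show ([r ++ [c]] ++ [[d]] : List (List (List String))) = [r ++ [c]] ++ [[d]] from rfl, hshift]
      have h := ih ([] : List (List String)) d
      simp only [List.nil_append] at h
      simp only [List.map_append, List.map_cons, List.map_nil, h2, Option.getD_some, h]
      simp [lcRec, hk]

theorem last_comment_alt_eq_lcRec (db : List (List String)) : last_comment_alt db = lcRec db := by
  cases db with
  | nil => rfl
  | cons c db' =>
    unfold last_comment_alt
    have hstep : bStep [] c = [[] ++ [c]] := by simp [bStep]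
    simp only [List.foldl_cons, hstep]
    exact foldl_bStep_run db' [] c

-- ===== VERDICT (by name: the statement is the Claim_ definition above) =====
theorem last_comment_spec : Claim_equal_last_comment := by
  intro db _ _
  unfold Spec_last_comment
  rw [last_comment_eq_lcRec, last_comment_alt_eq_lcRec]
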